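-- pv_equiv track=rewrite | github.com/Bichev/car-finder | src/services/perplexity_service.py | _extract_seasonal_patterns
-- ===== SOURCE A (Python) =====
-- from typing import Dict, Any, List, Optional
--
-- def _extract_seasonal_patterns(content: str) -> List[str]:
--     """Extract seasonal patterns"""
--     seasons = ["spring", "summer", "fall", "winter"]
--     patterns = []
--
--     for season in seasons:
--         if season in content.lower():
--             # Find the sentence containing the season
--             sentences = content.split('.')
--             for sentence in sentences:
--                 if season in sentence.lower():
--                     patterns.append(f"{season.capitalize()}: {sentence.strip()}")
--                     break
--
--     return patterns
-- ===== SOURCE B (Python) =====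
-- def _extract_seasonal_patterns(content):
--     """Extract seasonal patterns: split once, index first matching sentence per season, emit in season order."""
--     seasons = ["spring", "summer", "fall", "winter"]
--     first = {}
--     for sentence in content.split('.'):
--         low = sentence.lower()
--         for season in seasons:
--             if season not in first and season in low:
--                 first[season] = sentence
--     return [f"{season.capitalize()}: {first[season].strip()}"
--             for season in seasons if season in first]
-- ===== Notes on version B (the rewrite author's own statement) =====
-- stated objective: alternative
-- what changed: Instead of rescanning the sentence list (and re-lowercasing the whole content) once per season, B splits and lowercases once, builds in a single pass a dict mapping each season to the first sentence containing it, then emits in the fixed season order.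
import Mathlib
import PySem

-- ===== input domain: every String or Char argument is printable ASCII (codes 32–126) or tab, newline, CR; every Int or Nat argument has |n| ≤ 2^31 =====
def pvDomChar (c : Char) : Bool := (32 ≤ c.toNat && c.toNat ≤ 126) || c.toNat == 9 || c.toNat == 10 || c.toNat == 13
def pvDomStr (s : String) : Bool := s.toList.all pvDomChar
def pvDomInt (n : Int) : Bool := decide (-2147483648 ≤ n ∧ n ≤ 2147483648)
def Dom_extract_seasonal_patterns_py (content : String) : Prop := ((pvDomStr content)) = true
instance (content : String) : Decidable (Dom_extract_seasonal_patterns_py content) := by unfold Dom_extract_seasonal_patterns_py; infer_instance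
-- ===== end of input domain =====

-- B replaces A's per-season rescan of the sentence list (and per-season re-lowercasing / re-splitting
-- of the whole content) by one pass over the sentences that indexes, per season, the first sentence
-- containing it, then emits in the fixed season order (objective: alternative).

-- shared constants/helpers (the same literals / calls appear in both Python sources)
def pvSeasons : List String := ["spring", "summer", "fall", "winter"]

-- str.capitalize(): first char to upper, rest to lower — exact on the ASCII domain
def pvCapitalize (s : String) : String :=
  match s.toList with
  | [] => ""
  | c :: cs => String.ofList (PySem.Chars.upperChar c :: PySem.Chars.lower cs)

-- content.split('.') (non-empty literal separator, so Python never raises)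
def pvSplitDot (content : String) : List String :=
  (PySem.Chars.splitOn content.toList ['.']).map String.ofList

-- ===== PORT A =====
-- inner 'for sentence in sentences: if season in sentence.lower(): patterns.append(...); break'
def pvInnerA (season : String) (patterns : List String) : List String → List String
  | [] => patterns
  | sentence :: rest =>
    if PySem.Str.isIn season (PySem.Str.lower sentence) then
      patterns ++ [pvCapitalize season ++ ": " ++ PySem.Str.strip sentence]
    else pvInnerA season patterns rest

def extract_seasonal_patterns_py (content : String) : List String :=
  pvSeasons.foldl (fun patterns season =>
    if PySem.Str.isIn season (PySem.Str.lower content) then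
      pvInnerA season patterns (pvSplitDot content)
    else patterns) []

-- ===== PORT B =====
-- one pass over the sentences: first[season] := first sentence whose lowercase contains season
def pvIndexB (sentences : List String) : PySem.Dict String String :=
  sentences.foldl (fun first sentence =>
    let low := PySem.Str.lower sentence
    pvSeasons.foldl (fun first season =>
      if !(first.contains season) && PySem.Str.isIn season low then
        first.insert season sentence
      else first) first) PySem.Dict.empty

def extract_seasonal_patterns_py_alt (content : String) : List String :=
  let first := pvIndexB (pvSplitDot content)
  pvSeasons.filterMap (fun season =>
    (first.get? season).map (fun sentence =>
      pvCapitalize season ++ ": " ++ PySem.Str.strip sentence))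

-- ===== PRECONDITION & SPEC =====
def Spec_extract_seasonal_patterns_py (content : String) (out : List String) : Prop := out = extract_seasonal_patterns_py_alt content
instance (content : String) (out : List String) : Decidable (Spec_extract_seasonal_patterns_py content out) := by unfold Spec_extract_seasonal_patterns_py; infer_instance

-- ===== CLAIM (what is proved, stated in full; the proofs are below) =====
def Claim_equal_extract_seasonal_patterns_py : Prop := ∀ (content : String), Dom_extract_seasonal_patterns_py content → Spec_extract_seasonal_patterns_py content (extract_seasonal_patterns_py content)

-- ===== LEMMAS AND PROOFS =====

-- reference version of Chars.splitOn for a single-character separator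
def pvSplitAux (d : Char) : List Char → List Char → List (List Char)
  | [], cur => [cur.reverse]
  | c :: rest, cur =>
    if c = d then cur.reverse :: pvSplitAux d rest []
    else pvSplitAux d rest (c :: cur)

theorem pvGo_eq (d : Char) : ∀ (fuel : Nat) (l cur : List Char) (acc : List (List Char)),
    l.length < fuel →
    PySem.Chars.splitOn.go [d] fuel l cur acc = acc.reverse ++ pvSplitAux d l cur := by
  intro fuel
  induction fuel with
  | zero => intro l cur acc h; omega
  | succ n ih =>
    intro l cur acc h
    cases l with
    | nil => simp [PySem.Chars.splitOn.go, pvSplitAux]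
    | cons c rest =>
      rw [PySem.Chars.splitOn.go]
      by_cases hc : c = d
      · subst hc
        simp only [List.isPrefixOf]
        rw [if_pos (by simp)]
        simp only [List.length_cons] at h
        rw [ih _ _ _ (by simpa using Nat.lt_of_succ_lt_succ h)]
        simp [pvSplitAux]
      · rw [if_neg (by simp [List.isPrefixOf]; intro hh; exact hc hh.symm)]
        rw [ih _ _ _ (by simp at h; omega)]
        simp [pvSplitAux, hc]

theorem pvSplitOn_eq (cs : List Char) :
    PySem.Chars.splitOn cs ['.'] = pvSplitAux '.' cs [] := by
  rw [PySem.Chars.splitOn, pvGo_eq '.' _ _ _ _ (by omega)]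
  simp

theorem pvSplitAux_infix (d : Char) : ∀ (l cur : List Char) (p : List Char),
    p ∈ pvSplitAux d l cur → p <:+: cur.reverse ++ l := by
  intro l
  induction l with
  | nil => intro cur p hp; simp [pvSplitAux] at hp; subst hp; simp
  | cons c rest ih =>
    intro cur p hp
    by_cases hc : c = d
    · subst hc
      simp [pvSplitAux] at hp
      rcases hp with rfl | hp
      · exact (List.prefix_append _ _).isInfix
      · have := ih [] p hp
        simp at this
        exact this.trans ((List.suffix_append_of_suffix (List.suffix_cons _ _)).isInfix)
    · have := ih (c :: cur) p (by simpa [pvSplitAux, hc] using hp)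
      simpa [List.append_assoc] using this

-- every sentence of content.split('.') is an infix of content
theorem pvPart_infix (content : String) (p : List Char)
    (hp : p ∈ PySem.Chars.splitOn content.toList ['.']) : p <:+: content.toList := by
  rw [pvSplitOn_eq] at hp
  simpa using pvSplitAux_infix '.' content.toList [] p hp

-- if season is absent from content.lower(), it is absent from each sentence's lower
theorem pvAbsent (content : String) (season s : String)
    (hs : s ∈ pvSplitDot content)
    (hg : PySem.Str.isIn season (PySem.Str.lower content) = false) :
    PySem.Str.isIn season (PySem.Str.lower s) = false := by
  rcases List.mem_map.1 hs with ⟨p, hp, rfl⟩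
  by_contra h
  have h' : PySem.Str.isIn season (PySem.Str.lower (String.ofList p)) = true := by
    cases hq : PySem.Str.isIn season (PySem.Str.lower (String.ofList p)) with
    | false => exact absurd hq h
    | true => rfl
  have hinf := (PySem.Str.isIn_iff_infix _ _).1 h'
  simp only [PySem.Str.toList_lower, String.toList_ofList] at hinf
  have hpc : p <:+: content.toList := pvPart_infix content p hp
  have : season.toList <:+: PySem.Chars.lower content.toList := by
    refine hinf.trans ?_
    simpa [PySem.Chars.lower] using hpc.map (PySem.Chars.lowerChar)
  have : PySem.Str.isIn season (PySem.Str.lower content) = true := by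
    rw [PySem.Str.isIn_iff_infix]
    simpa [PySem.Str.toList_lower] using this
  rw [hg] at this; exact absurd this (by simp)

def pvFmt (season sentence : String) : String :=
  pvCapitalize season ++ ": " ++ PySem.Str.strip sentence

theorem pvInnerA_eq (season : String) (patterns sentences : List String) :
    pvInnerA season patterns sentences =
      patterns ++ ((sentences.find? (fun s => PySem.Str.isIn season (PySem.Str.lower s))).map
        (pvFmt season)).toList := by
  induction sentences with
  | nil => simp [pvInnerA]
  | cons s rest ih =>
    simp only [pvInnerA]
    cases h : PySem.Str.isIn season (PySem.Str.lower s)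
    · rw [ih, List.find?_cons_of_neg (by simpa using h)]
      simp
    · rw [List.find?_cons_of_pos (by simpa using h)]
      simp [pvFmt]

-- the inner fold over the seasons, observed at one key
theorem pvInnerB_get? (sentence : String) (ss : List String) (d : PySem.Dict String String)
    (season : String) :
    (ss.foldl (fun first sea =>
        if !(first.contains sea) && PySem.Str.isIn sea (PySem.Str.lower sentence) then
          first.insert sea sentence
        else first) d).get? season =
      if season ∈ ss ∧ d.contains season = false ∧
          PySem.Str.isIn season (PySem.Str.lower sentence) = true then some sentence
      else d.get? season := by
  induction ss generalizing d with
  | nil => simp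
  | cons sea rest ih =>
    simp only [List.foldl_cons]
    by_cases hsea : sea = season
    · subst hsea
      by_cases hcond : (!(d.contains sea) && PySem.Str.isIn sea (PySem.Str.lower sentence)) = true
      · rw [if_pos hcond, ih]
        simp only [Bool.and_eq_true, Bool.not_eq_true'] at hcond
        have hcont : (d.insert sea sentence).contains sea = true :=
          PySem.Dict.contains_insert_self d sea sentence
        rw [if_neg (fun h => by rw [hcont] at h; exact absurd h.2.1 (by simp)),
            PySem.Dict.get?_insert_self,
            if_pos ⟨List.mem_cons_self, hcond.1, hcond.2⟩]
      · rw [if_neg hcond, ih]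
        simp only [Bool.and_eq_true, Bool.not_eq_true', not_and] at hcond
        rw [if_neg (fun h => hcond h.2.1 h.2.2), if_neg (fun h => hcond h.2.1 h.2.2)]
    · have hne : season ≠ sea := fun e => hsea e.symm
      by_cases hcond : (!(d.contains sea) && PySem.Str.isIn sea (PySem.Str.lower sentence)) = true
      · rw [if_pos hcond, ih]
        have hc : (d.insert sea sentence).contains season = d.contains season := by
          rw [PySem.Dict.contains_insert]
          simp [hne]
        have hg : (d.insert sea sentence).get? season = d.get? season :=
          PySem.Dict.get?_insert_of_ne d sentence hne
        rw [hc, hg]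
        by_cases hm : season ∈ rest ∧ d.contains season = false ∧
            PySem.Str.isIn season (PySem.Str.lower sentence) = true
        · rw [if_pos hm, if_pos ⟨List.mem_cons_of_mem _ hm.1, hm.2⟩]
        · rw [if_neg hm,
              if_neg (fun h => hm ⟨(List.mem_cons.1 h.1).resolve_left hne, h.2⟩)]
      · rw [if_neg hcond, ih]
        by_cases hm : season ∈ rest ∧ d.contains season = false ∧
            PySem.Str.isIn season (PySem.Str.lower sentence) = true
        · rw [if_pos hm, if_pos ⟨List.mem_cons_of_mem _ hm.1, hm.2⟩]
        · rw [if_neg hm,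
              if_neg (fun h => hm ⟨(List.mem_cons.1 h.1).resolve_left hne, h.2⟩)]

theorem pvFoldB_get? (sentences : List String) (season : String) (hmem : season ∈ pvSeasons) :
    ∀ d : PySem.Dict String String,
    (sentences.foldl (fun first sentence =>
        pvSeasons.foldl (fun first sea =>
          if !(first.contains sea) && PySem.Str.isIn sea (PySem.Str.lower sentence) then
            first.insert sea sentence
          else first) first) d).get? season =
      match d.get? season with
      | some v => some v
      | none => sentences.find? (fun s => PySem.Str.isIn season (PySem.Str.lower s)) := by
  induction sentences with
  | nil => intro d; cases h : d.get? season <;> simp [h]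
  | cons s rest ih =>
    intro d
    simp only [List.foldl_cons]
    rw [ih, pvInnerB_get? s pvSeasons d season]
    cases hg : d.get? season with
    | some v =>
      have hc : d.contains season = true := by
        rw [PySem.Dict.contains_eq_isSome_get?, hg]; rfl
      rw [if_neg (fun h => by rw [hc] at h; exact absurd h.2.1 (by simp))]
    | none =>
      have hc : d.contains season = false := by
        rw [PySem.Dict.contains_eq_isSome_get?, hg]; rfl
      cases hin : PySem.Str.isIn season (PySem.Str.lower s) with
      | true =>
        rw [if_pos ⟨hmem, hc, rfl⟩, List.find?_cons_of_pos (by simpa using hin)]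
      | false =>
        rw [if_neg (fun h => by simpa using h.2.2),
            List.find?_cons_of_neg (by simpa using hin)]

theorem pvIndexB_get? (sentences : List String) (season : String) (hmem : season ∈ pvSeasons) :
    (pvIndexB sentences).get? season =
      sentences.find? (fun s => PySem.Str.isIn season (PySem.Str.lower s)) := by
  rw [pvIndexB, pvFoldB_get? sentences season hmem]
  simp [PySem.Dict.get?_empty]

-- a fold whose step appends at most one element is a filterMap
theorem pvFoldl_filterMap (g : String → Option String) (l : List String)
    (step : List String → String → List String)
    (h : ∀ pat x, x ∈ l → step pat x = pat ++ (g x).toList) :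
    ∀ init, l.foldl step init = init ++ l.filterMap g := by
  induction l with
  | nil => intro init; simp
  | cons x rest ih =>
    intro init
    simp only [List.foldl_cons, List.filterMap_cons]
    rw [h init x List.mem_cons_self, ih (fun pat y hy => h pat y (List.mem_cons_of_mem _ hy))]
    cases g x <;> simp

theorem pvMain (content : String) :
    extract_seasonal_patterns_py content = extract_seasonal_patterns_py_alt content := by
  rw [extract_seasonal_patterns_py, extract_seasonal_patterns_py_alt,
    pvFoldl_filterMap (fun season =>
      if PySem.Str.isIn season (PySem.Str.lower content) then
        ((pvSplitDot content).find?
          (fun s => PySem.Str.isIn season (PySem.Str.lower s))).map (pvFmt season)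
      else none) pvSeasons _
      (fun pat x _ => by
        beta_reduce
        by_cases hg : PySem.Str.isIn x (PySem.Str.lower content)
        · rw [if_pos hg, if_pos hg, pvInnerA_eq]
        · rw [if_neg hg, if_neg hg]; simp) []]
  simp only [List.nil_append]
  refine List.filterMap_congr (fun season hmem => ?_)
  rw [pvIndexB_get? _ season hmem]
  cases hg : PySem.Str.isIn season (PySem.Str.lower content)
  · rw [if_neg (by simp)]
    have hnone : (pvSplitDot content).find?
        (fun s => PySem.Str.isIn season (PySem.Str.lower s)) = none :=
      List.find?_eq_none.mpr (fun s hs => by simpa using pvAbsent content season s hs hg)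
    rw [hnone]; rfl
  · rw [if_pos rfl]; rfl

-- ===== VERDICT (by name: the statement is the Claim_ definition above) =====
theorem extract_seasonal_patterns_py_spec : Claim_equal_extract_seasonal_patterns_py := by
  intro content _
  exact pvMain content
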